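-- pv_equiv track=rewrite | github.com/joysn/recursion-dynamic-programing | dynamic_fill_plot.py | no_of_ways_to_fill_plot
-- ===== SOURCE A (Python) =====
-- def no_of_ways_to_fill_plot(plotWidth):
--
-- 	if plotWidth == 0:
-- 		return 0
-- 	if plotWidth == tileWidth:
-- 		return tileWidth
-- 	if plotWidth == tileHeight:
-- 		return tileHeight
--
-- 	a = tileWidth
-- 	b = tileHeight
-- 	no_of_ways = 0
-- 	for i in range(3,plotWidth+1):
-- 		no_of_ways = a + b
-- 		a = b
-- 		b = no_of_ways
-- 	return no_of_ways
--
-- tileHeight = 2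
--
-- tileWidth = 1
-- ===== SOURCE B (Python) =====
-- def _fast_fib(n):
--     # returns (F(n), F(n+1)) with F(0)=0, F(1)=1, by fast doubling
--     if n == 0:
--         return (0, 1)
--     a, b = _fast_fib(n // 2)
--     c = a * (2 * b - a)
--     d = a * a + b * b
--     if n % 2 == 0:
--         return (c, d)
--     return (d, c + d)
--
-- def no_of_ways_to_fill_plot(plotWidth):
--     if plotWidth <= 0:
--         return 0
--     return _fast_fib(plotWidth + 1)[0]
-- ===== Notes on version B (the rewrite author's own statement) =====
-- stated objective: faster
-- what changed: Replaces the linear Fibonacci-style loop with fast-doubling recursion on the number's binary representation; intended as faster (O(log n) vs O(n) arithmetic steps); a timing run measured large speedups (>80x) but could not confirm at its largest size.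
import Mathlib
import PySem

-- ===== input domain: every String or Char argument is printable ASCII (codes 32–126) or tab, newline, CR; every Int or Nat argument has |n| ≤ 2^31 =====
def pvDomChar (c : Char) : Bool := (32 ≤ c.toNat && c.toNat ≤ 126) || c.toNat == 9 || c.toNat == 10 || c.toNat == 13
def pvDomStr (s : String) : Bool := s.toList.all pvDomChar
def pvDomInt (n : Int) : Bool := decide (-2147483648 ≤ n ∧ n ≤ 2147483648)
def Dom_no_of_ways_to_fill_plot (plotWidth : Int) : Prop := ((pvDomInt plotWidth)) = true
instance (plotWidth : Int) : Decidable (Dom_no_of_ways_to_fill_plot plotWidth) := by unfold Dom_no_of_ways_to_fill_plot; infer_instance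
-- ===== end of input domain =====

-- B replaces A's iterative recurrence (n loop steps) with fast-doubling recursion (log n steps);
-- intended as faster; a timing run measured large speedups (>80x) but could not confirm at its largest size.

-- ===== PORT A =====
-- literal transliteration of A's loop: state (a, b, no_of_ways) over range(3, plotWidth+1)
def no_of_ways_to_fill_plot (plotWidth : Int) : Int :=
  if plotWidth = 0 then 0
  else if plotWidth = 1 then 1
  else if plotWidth = 2 then 2
  else
    let s := (PySem.List.pyRange 3 (plotWidth + 1) 1).foldl
      (fun (st : Int × Int × Int) _ =>
        let no_of_ways := st.1 + st.2.1
        (st.2.1, no_of_ways, no_of_ways)) (1, 2, 0)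
    s.2.2

-- ===== PORT B =====
-- fast doubling: fastFib n = (F n, F (n+1))
def fastFib : Nat → Int × Int
  | 0 => (0, 1)
  | n + 1 =>
    let p := fastFib ((n + 1) / 2)
    let a := p.1
    let b := p.2
    let c := a * (2 * b - a)
    let d := a * a + b * b
    if (n + 1) % 2 = 0 then (c, d) else (d, c + d)
decreasing_by omega

def no_of_ways_to_fill_plot_alt (plotWidth : Int) : Int :=
  if plotWidth ≤ 0 then 0
  else (fastFib ((plotWidth + 1).toNat)).1

-- ===== PRECONDITION & SPEC =====
def Spec_no_of_ways_to_fill_plot (plotWidth : Int) (out : Int) : Prop := out = no_of_ways_to_fill_plot_alt plotWidth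
instance (plotWidth : Int) (out : Int) : Decidable (Spec_no_of_ways_to_fill_plot plotWidth out) := by unfold Spec_no_of_ways_to_fill_plot; infer_instance

-- ===== CLAIM (what is proved, stated in full; the proofs are below) =====
def Claim_equal_no_of_ways_to_fill_plot : Prop := ∀ (plotWidth : Int), Dom_no_of_ways_to_fill_plot plotWidth → Spec_no_of_ways_to_fill_plot plotWidth (no_of_ways_to_fill_plot plotWidth)

-- ===== LEMMAS AND PROOFS =====

def fibZ (n : Nat) : Int := (Nat.fib n : Int)

theorem fibZ_add_two (a : Nat) : fibZ a + fibZ (a + 1) = fibZ (a + 2) := by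
  simp only [fibZ]
  rw [Nat.fib_add_two]
  push_cast; ring

theorem fastFib_eq (n : Nat) : fastFib n = (fibZ n, fibZ (n + 1)) := by
  induction n using Nat.strong_induction_on with
  | _ n ih =>
    match n with
    | 0 => simp [fastFib, fibZ]
    | m + 1 =>
      rw [fastFib]
      rw [ih ((m + 1) / 2) (by omega)]
      set q := (m + 1) / 2 with hq
      have hle : Nat.fib q ≤ 2 * Nat.fib (q + 1) :=
        le_trans (Nat.fib_le_fib_succ) (by omega)
      have heven : fibZ (2 * q) = fibZ q * (2 * fibZ (q + 1) - fibZ q) := by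
        simp only [fibZ]
        rw [Nat.fib_two_mul]; push_cast [hle]; ring
      have hodd : fibZ (2 * q + 1) = fibZ q * fibZ q + fibZ (q + 1) * fibZ (q + 1) := by
        simp only [fibZ]
        rw [Nat.fib_two_mul_add_one]; push_cast; ring
      by_cases hm : (m + 1) % 2 = 0
      · rw [if_pos hm]
        rw [show m + 1 = 2 * q by omega]
        rw [heven, hodd]
      · rw [if_neg hm]
        rw [show m + 1 = 2 * q + 1 by omega]
        rw [show 2 * q + 1 + 1 = (2 * q) + 2 by omega, ← fibZ_add_two, heven, hodd]

def stepA (st : Int × Int × Int) (_ : Int) : Int × Int × Int :=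
  let no_of_ways := st.1 + st.2.1
  (st.2.1, no_of_ways, no_of_ways)

theorem loopA (n : Nat) :
    (PySem.List.pyRange 3 ((3 : Int) + n + 1) 1).foldl stepA (1, 2, 0)
      = (fibZ (n + 3), fibZ (n + 4), fibZ (n + 4)) := by
  induction n with
  | zero =>
    rw [show (3 : Int) + ((0 : Nat) : Int) + 1 = 3 + 1 by norm_num,
        PySem.List.pyRange_one_singleton]
    simp only [List.foldl, stepA]
    rw [Prod.mk.injEq, Prod.mk.injEq]
    refine ⟨by decide, by decide, by decide⟩
  | succ k ih =>
    have hsplit : PySem.List.pyRange 3 ((3 : Int) + ((k + 1 : Nat) : Int) + 1) 1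
        = PySem.List.pyRange 3 ((3 : Int) + k + 1) 1 ++ [(3 : Int) + k + 1] := by
      rw [show (3 : Int) + ((k + 1 : Nat) : Int) + 1 = ((3 : Int) + k + 1) + 1 by push_cast; ring]
      exact PySem.List.pyRange_one_succ_right (by omega)
    rw [hsplit, List.foldl_append, ih]
    simp only [List.foldl, stepA]
    have hA : fibZ (k + 3) + fibZ (k + 4) = fibZ (k + 1 + 4) := by
      have h := fibZ_add_two (k + 3)
      rw [show k + 3 + 1 = k + 4 by omega, show k + 3 + 2 = k + 1 + 4 by omega] at h
      exact h
    rw [Prod.mk.injEq, Prod.mk.injEq]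
    refine ⟨by rw [show k + 1 + 3 = k + 4 by omega], hA, hA⟩

-- ===== VERDICT (by name: the statement is the Claim_ definition above) =====
theorem no_of_ways_to_fill_plot_spec : Claim_equal_no_of_ways_to_fill_plot := by
  intro w _
  unfold Spec_no_of_ways_to_fill_plot no_of_ways_to_fill_plot no_of_ways_to_fill_plot_alt
  by_cases h0 : w = 0
  · subst h0; rfl
  by_cases h1 : w = 1
  · subst h1
    rw [if_neg (by omega), if_pos rfl, if_neg (by omega)]
    rw [show ((1 : Int) + 1).toNat = 2 by rfl, fastFib_eq]
    decide
  by_cases h2 : w = 2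
  · subst h2
    rw [if_neg (by omega), if_neg (by omega), if_pos rfl, if_neg (by omega)]
    rw [show ((2 : Int) + 1).toNat = 3 by rfl, fastFib_eq]
    decide
  rw [if_neg h0, if_neg h1, if_neg h2]
  by_cases hneg : w ≤ 0
  · rw [if_pos hneg, PySem.List.pyRange_one_eq_nil (by omega)]
    rfl
  · -- w ≥ 3 here
    rw [if_neg hneg]
    obtain ⟨n, hn⟩ : ∃ n : Nat, w = 3 + (n : Int) := ⟨(w - 3).toNat, by omega⟩
    subst hn
    have hl := loopA n
    show (List.foldl stepA (1, 2, 0) (PySem.List.pyRange 3 ((3 : Int) + n + 1) 1)).2.2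
        = (fastFib (((3 : Int) + n + 1).toNat)).1
    rw [hl, show ((3 : Int) + n + 1).toNat = n + 4 by omega, fastFib_eq]
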